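-- pv_equiv track=rewrite | github.com/Egraf99/Running_line | symbols.py | from_up_to_bottom_and_penultimate_without_bottom
-- ===== SOURCE A (Python) =====
-- def from_up_to_bottom_and_penultimate_without_bottom(pix_column: list, height: int, symbol_id, order_col) -> list:
--     for h in range(height):
--         if h == order_col - 1 and h < height - height // 3:
--             pix_column.append(symbol_id[0])
--         elif h == height - height // 3 and h != height - 1:
--             pix_column.append(symbol_id[1])
--         else:
--             pix_column.append(0)
--     return pix_column
-- ===== SOURCE B (Python) =====
-- def from_up_to_bottom_and_penultimate_without_bottom(pix_column: list, height: int, symbol_id, order_col) -> list: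
--     filler = [0] * max(height, 0)
--     i1 = order_col - 1
--     i2 = height - height // 3
--     if 0 <= i1 < i2:
--         filler[i1] = symbol_id[0]
--     if 0 <= i2 < height and i2 != height - 1:
--         filler[i2] = symbol_id[1]
--     pix_column.extend(filler)
--     return pix_column
-- ===== Notes on version B (the rewrite author's own statement) =====
-- stated objective: simpler
-- what changed: Replaces the per-row loop with three branch tests by allocating a zero-filled column once and writing the two symbol cells directly at their computed indices (order_col-1 and height-height//3), second write overriding the first to match the elif precedence.
-- outside the precondition, e.g. on from_up_to_bottom_and_penultimate_without_bottom([], 6, [], 1): A raises IndexError, B raises IndexError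
import Mathlib
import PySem

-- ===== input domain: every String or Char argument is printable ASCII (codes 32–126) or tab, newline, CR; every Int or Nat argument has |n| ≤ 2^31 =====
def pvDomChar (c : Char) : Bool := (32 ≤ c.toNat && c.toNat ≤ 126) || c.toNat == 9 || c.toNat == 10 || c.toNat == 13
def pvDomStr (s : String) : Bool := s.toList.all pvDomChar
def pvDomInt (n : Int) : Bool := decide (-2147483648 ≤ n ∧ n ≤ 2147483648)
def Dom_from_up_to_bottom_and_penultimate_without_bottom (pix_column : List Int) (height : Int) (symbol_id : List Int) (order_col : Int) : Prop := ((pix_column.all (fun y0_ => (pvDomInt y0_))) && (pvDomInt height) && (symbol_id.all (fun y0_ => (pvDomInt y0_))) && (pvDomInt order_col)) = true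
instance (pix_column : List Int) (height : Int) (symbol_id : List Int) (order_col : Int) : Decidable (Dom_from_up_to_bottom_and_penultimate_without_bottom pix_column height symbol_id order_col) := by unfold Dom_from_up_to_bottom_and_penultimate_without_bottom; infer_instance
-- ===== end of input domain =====

-- B replaces A's per-row loop by a zero-filled column with the two symbol cells written directly
-- at their computed indices (simpler decomposition; same cost). Note: the Python A and B both
-- mutate/extend pix_column in place; the equivalence proved here is about the return value.

-- ===== PORT A =====
-- literal port of A's loop; symbol_id[k] is pyGetD with default 0 — Pre_ guarantees the index is in range
def from_up_to_bottom_and_penultimate_without_bottom (pix_column : List Int) (height : Int) (symbol_id : List Int) (order_col : Int) : List Int :=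
  (PySem.List.pyRange 0 height 1).foldl (fun acc h =>
    if h = order_col - 1 ∧ h < height - PySem.Int.floordiv height 3 then
      acc ++ [PySem.List.pyGetD symbol_id 0 0]
    else if h = height - PySem.Int.floordiv height 3 ∧ h ≠ height - 1 then
      acc ++ [PySem.List.pyGetD symbol_id 1 0]
    else
      acc ++ [0]) pix_column

-- ===== PORT B =====
def from_up_to_bottom_and_penultimate_without_bottom_alt (pix_column : List Int) (height : Int) (symbol_id : List Int) (order_col : Int) : List Int :=
  let filler0 : List Int := List.replicate (max height 0).toNat 0
  let i1 := order_col - 1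
  let i2 := height - PySem.Int.floordiv height 3
  let filler1 := if 0 ≤ i1 ∧ i1 < i2 then filler0.set i1.toNat (PySem.List.pyGetD symbol_id 0 0) else filler0
  let filler2 := if 0 ≤ i2 ∧ i2 < height ∧ i2 ≠ height - 1 then filler1.set i2.toNat (PySem.List.pyGetD symbol_id 1 0) else filler1
  pix_column ++ filler2

-- ===== PRECONDITION & SPEC =====
-- Pre_ excludes exactly the inputs on which both Pythons raise IndexError: symbol_id too short
-- for a symbol cell that the loop actually reaches.
def Pre_from_up_to_bottom_and_penultimate_without_bottom (pix_column : List Int) (height : Int) (symbol_id : List Int) (order_col : Int) : Prop :=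
  ((0 ≤ order_col - 1 ∧ order_col - 1 < height - PySem.Int.floordiv height 3) → 1 ≤ symbol_id.length) ∧
  ((0 ≤ height - PySem.Int.floordiv height 3 ∧ height - PySem.Int.floordiv height 3 < height ∧ height - PySem.Int.floordiv height 3 ≠ height - 1) → 2 ≤ symbol_id.length)
instance (pix_column : List Int) (height : Int) (symbol_id : List Int) (order_col : Int) : Decidable (Pre_from_up_to_bottom_and_penultimate_without_bottom pix_column height symbol_id order_col) := by unfold Pre_from_up_to_bottom_and_penultimate_without_bottom; infer_instance

def pvWitness_from_up_to_bottom_and_penultimate_without_bottom : List Int × Int × List Int × Int := ([5], 6, [7, 8], 2)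

def Spec_from_up_to_bottom_and_penultimate_without_bottom (pix_column : List Int) (height : Int) (symbol_id : List Int) (order_col : Int) (out : List Int) : Prop := out = from_up_to_bottom_and_penultimate_without_bottom_alt pix_column height symbol_id order_col
instance (pix_column : List Int) (height : Int) (symbol_id : List Int) (order_col : Int) (out : List Int) : Decidable (Spec_from_up_to_bottom_and_penultimate_without_bottom pix_column height symbol_id order_col out) := by unfold Spec_from_up_to_bottom_and_penultimate_without_bottom; infer_instance

-- ===== CLAIM (what is proved, stated in full; the proofs are below) =====
def Claim_equal_from_up_to_bottom_and_penultimate_without_bottom : Prop := ∀ (pix_column : List Int) (height : Int) (symbol_id : List Int) (order_col : Int), Dom_from_up_to_bottom_and_penultimate_without_bottom pix_column height symbol_id order_col → Pre_from_up_to_bottom_and_penultimate_without_bottom pix_column height symbol_id order_col → Spec_from_up_to_bottom_and_penultimate_without_bottom pix_column height symbol_id order_col (from_up_to_bottom_and_penultimate_without_bottom pix_column height symbol_id order_col)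

-- ===== LEMMAS AND PROOFS =====

-- ===== VERDICT (by name: the statement is the Claim_ definition above) =====
theorem from_up_to_bottom_and_penultimate_without_bottom_spec : Claim_equal_from_up_to_bottom_and_penultimate_without_bottom := by
  intro pix_column height symbol_id order_col _ _
  unfold Spec_from_up_to_bottom_and_penultimate_without_bottom
  unfold from_up_to_bottom_and_penultimate_without_bottom from_up_to_bottom_and_penultimate_without_bottom_alt
  simp only []
  set q := PySem.Int.floordiv height 3 with hqdef
  have hq : 3 * q ≤ height ∧ height < 3 * (q + 1) := by
    have := (PySem.Int.floordiv_eq_iff_of_pos (a := height) (b := 3) (q := q) (by omega)).mp hqdef.symm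
    constructor <;> omega
  set s0 := PySem.List.pyGetD symbol_id 0 0
  set s1 := PySem.List.pyGetD symbol_id 1 0
  set g : Int → Int := fun h =>
    if h = order_col - 1 ∧ h < height - q then s0
    else if h = height - q ∧ h ≠ height - 1 then s1 else 0 with hg
  have hstep : (fun (acc : List Int) h =>
      if h = order_col - 1 ∧ h < height - q then acc ++ [s0]
      else if h = height - q ∧ h ≠ height - 1 then acc ++ [s1]
      else acc ++ [0]) = fun acc h => acc ++ [g h] := by
    funext acc h
    simp only [hg]
    split_ifs <;> rfl
  rw [hstep, PySem.List.foldl_append_singleton_eq_map]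
  congr 1
  apply List.ext_getElem
  · simp [PySem.List.length_pyRange_one]
    split_ifs <;> simp <;> omega
  · intro i hi1 hi2
    simp only [List.length_map, PySem.List.length_pyRange_one] at hi1
    have hih : (i : Int) < height := by omega
    rw [List.getElem_map, PySem.List.getElem_pyRange_one]
    simp only [hg, zero_add]
    split_ifs with h1 h2 h3 h4 h5 h6 h7 h8 h9 h10 h11 <;>
      simp [List.getElem_set, List.getElem_replicate] <;>
      (intros; first | rfl | omega)
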